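-- pv_equiv track=rewrite | github.com/alexmeckes/ClawSwitch | router/app.py | _nearest_available_tier
-- ===== SOURCE A (Python) =====
-- TIER_ORDER = ("SIMPLE", "MEDIUM", "COMPLEX", "REASONING")
--
-- TIER_RANK = {tier: index for index, tier in enumerate(TIER_ORDER)}
--
-- def _nearest_available_tier(selected_tier: str, available_tiers: set[str]) -> str:
--     if selected_tier in available_tiers:
--         return selected_tier
--
--     selected_rank = TIER_RANK.get(selected_tier, TIER_RANK["MEDIUM"])
--     for delta in range(1, len(TIER_ORDER)):
--         higher_rank = selected_rank + delta
--         if higher_rank < len(TIER_ORDER):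
--             higher_tier = TIER_ORDER[higher_rank]
--             if higher_tier in available_tiers:
--                 return higher_tier
--
--         lower_rank = selected_rank - delta
--         if lower_rank >= 0:
--             lower_tier = TIER_ORDER[lower_rank]
--             if lower_tier in available_tiers:
--                 return lower_tier
--
--     for tier in TIER_ORDER:
--         if tier in available_tiers:
--             return tier
--
--     return "MEDIUM"
-- ===== SOURCE B (Python) =====
-- TIER_ORDER = ("SIMPLE", "MEDIUM", "COMPLEX", "REASONING")
--
-- TIER_RANK = {tier: index for index, tier in enumerate(TIER_ORDER)}
--
-- def _nearest_available_tier(selected_tier: str, available_tiers: set[str]) -> str: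
--     if selected_tier in available_tiers:
--         return selected_tier
--     sel = TIER_RANK.get(selected_tier, TIER_RANK["MEDIUM"])
--     ring = [t for t in TIER_ORDER if t in available_tiers and TIER_RANK[t] != sel]
--     if ring:
--         return min(ring, key=lambda t: (abs(TIER_RANK[t] - sel), TIER_RANK[t] < sel))
--     return "MEDIUM"
-- ===== Notes on version B (the rewrite author's own statement) =====
-- stated objective: simpler
-- what changed: Replaces A's expanding-ring delta loop plus a second fallback scan over TIER_ORDER by one filter of TIER_ORDER (available tiers whose rank differs from the selected rank) and a single min with key (|rank-sel|, rank<sel), with 'MEDIUM' when the filter is empty.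
import Mathlib
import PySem

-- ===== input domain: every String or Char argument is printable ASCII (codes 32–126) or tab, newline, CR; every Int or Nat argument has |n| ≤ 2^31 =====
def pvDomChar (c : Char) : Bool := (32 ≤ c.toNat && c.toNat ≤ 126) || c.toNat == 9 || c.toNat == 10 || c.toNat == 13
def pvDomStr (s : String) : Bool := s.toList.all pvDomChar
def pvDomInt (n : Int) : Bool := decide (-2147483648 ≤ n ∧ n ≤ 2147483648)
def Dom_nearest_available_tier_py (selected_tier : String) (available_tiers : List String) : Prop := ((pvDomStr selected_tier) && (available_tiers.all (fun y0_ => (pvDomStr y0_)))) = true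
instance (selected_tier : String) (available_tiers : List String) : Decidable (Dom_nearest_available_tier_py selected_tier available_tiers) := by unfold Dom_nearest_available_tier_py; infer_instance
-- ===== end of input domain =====

-- B replaces A's expanding-ring search and double fallback loop by one filter +
-- min-with-key over the fixed tier order (objective: simpler).

-- ===== PORT A =====
def pvTIER_ORDER : List String := ["SIMPLE", "MEDIUM", "COMPLEX", "REASONING"]

def pvTIER_RANK : PySem.Dict String Int :=
  (PySem.List.enumerate pvTIER_ORDER).foldl (fun d p => d.insert p.2 p.1) PySem.Dict.empty

-- the 'for delta in range(1, len(TIER_ORDER))' loop with its early returns;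
-- TIER_ORDER[rank] is ported with pyGetD (the guards keep the index in range, so it is exact)
def pvRingLoopA (sel : Int) (av : List String) : List Int → Option String
  | [] => none
  | delta :: rest =>
    let higher_rank := sel + delta
    let hit : Option String :=
      if higher_rank < (pvTIER_ORDER.length : Int) then
        let higher_tier := PySem.List.pyGetD pvTIER_ORDER higher_rank ""
        if av.contains higher_tier then some higher_tier else none
      else none
    match hit with
    | some t => some t
    | none =>
      let lower_rank := sel - delta
      if 0 ≤ lower_rank then
        let lower_tier := PySem.List.pyGetD pvTIER_ORDER lower_rank ""
        if av.contains lower_tier then some lower_tier else pvRingLoopA sel av rest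
      else pvRingLoopA sel av rest

def nearest_available_tier_py (selected_tier : String) (available_tiers : List String) : String :=
  if available_tiers.contains selected_tier then selected_tier
  else
    -- TIER_RANK.get(selected_tier, TIER_RANK["MEDIUM"]); "MEDIUM" is a present key, so getD is exact
    let selected_rank := pvTIER_RANK.getD selected_tier (pvTIER_RANK.getD "MEDIUM" 0)
    match pvRingLoopA selected_rank available_tiers
        (PySem.List.pyRange 1 (pvTIER_ORDER.length : Int) 1) with
    | some t => t
    | none =>
      -- 'for tier in TIER_ORDER: if tier in available_tiers: return tier'
      match pvTIER_ORDER.find? (fun t => available_tiers.contains t) with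
      | some t => t
      | none => "MEDIUM"

-- ===== PORT B =====
def nearest_available_tier_py_alt (selected_tier : String) (available_tiers : List String) : String :=
  if available_tiers.contains selected_tier then selected_tier
  else
    let sel := pvTIER_RANK.getD selected_tier (pvTIER_RANK.getD "MEDIUM" 0)
    let ring := pvTIER_ORDER.filter
      (fun t => available_tiers.contains t && pvTIER_RANK.getD t 0 != sel)
    match PySem.List.min2? ring
        (fun t => |pvTIER_RANK.getD t 0 - sel|)
        (fun t => decide (pvTIER_RANK.getD t 0 < sel)) with
    | some t => t
    | none => "MEDIUM"

-- ===== PRECONDITION & SPEC =====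
def Spec_nearest_available_tier_py (selected_tier : String) (available_tiers : List String) (out : String) : Prop := out = nearest_available_tier_py_alt selected_tier available_tiers
instance (selected_tier : String) (available_tiers : List String) (out : String) : Decidable (Spec_nearest_available_tier_py selected_tier available_tiers out) := by unfold Spec_nearest_available_tier_py; infer_instance

-- ===== CLAIM (what is proved, stated in full; the proofs are below) =====
def Claim_equal_nearest_available_tier_py : Prop := ∀ (selected_tier : String) (available_tiers : List String), Dom_nearest_available_tier_py selected_tier available_tiers → Spec_nearest_available_tier_py selected_tier available_tiers (nearest_available_tier_py selected_tier available_tiers)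

-- ===== LEMMAS AND PROOFS =====

theorem pv_mk : pvTIER_RANK = PySem.Dict.mk [("SIMPLE",(0:Int)),("MEDIUM",1),("COMPLEX",2),("REASONING",3)] := by decide

-- after the guard fails, the selected rank is 0..3 and, unless it is the MEDIUM default,
-- the tier holding that rank is exactly selected_tier, hence not available
theorem pv_sel (s : String) (av : List String) (hs : ¬ av.contains s = true) :
    pvTIER_RANK.getD s (pvTIER_RANK.getD "MEDIUM" 0) = 1 ∨
    (pvTIER_RANK.getD s (pvTIER_RANK.getD "MEDIUM" 0) = 0 ∧ "SIMPLE" ∉ av) ∨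
    (pvTIER_RANK.getD s (pvTIER_RANK.getD "MEDIUM" 0) = 2 ∧ "COMPLEX" ∉ av) ∨
    (pvTIER_RANK.getD s (pvTIER_RANK.getD "MEDIUM" 0) = 3 ∧ "REASONING" ∉ av) := by
  by_cases e0 : s = "SIMPLE"
  · subst e0; exact Or.inr (Or.inl ⟨by decide, by simpa using hs⟩)
  by_cases e2 : s = "COMPLEX"
  · subst e2; exact Or.inr (Or.inr (Or.inl ⟨by decide, by simpa using hs⟩))
  by_cases e3 : s = "REASONING"
  · subst e3; exact Or.inr (Or.inr (Or.inr ⟨by decide, by simpa using hs⟩))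
  by_cases e1 : s = "MEDIUM"
  · subst e1; left; decide
  left
  rw [pv_mk]
  simp [PySem.Dict.getD, PySem.Dict.get?, Ne.symm e0, Ne.symm e1, Ne.symm e2, Ne.symm e3]

set_option maxHeartbeats 2000000 in
theorem pv_core (sel : Int) (av : List String)
    (hsel : sel = 1 ∨ (sel = 0 ∧ "SIMPLE" ∉ av) ∨ (sel = 2 ∧ "COMPLEX" ∉ av) ∨
      (sel = 3 ∧ "REASONING" ∉ av)) :
    (match pvRingLoopA sel av (PySem.List.pyRange 1 (pvTIER_ORDER.length : Int) 1) with
      | some t => t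
      | none =>
        match pvTIER_ORDER.find? (fun t => av.contains t) with
        | some t => t
        | none => "MEDIUM") =
    (match PySem.List.min2?
        (pvTIER_ORDER.filter (fun t => av.contains t && pvTIER_RANK.getD t 0 != sel))
        (fun t => |pvTIER_RANK.getD t 0 - sel|)
        (fun t => decide (pvTIER_RANK.getD t 0 < sel)) with
      | some t => t
      | none => "MEDIUM") := by
  have pr : PySem.List.pyRange 1 (pvTIER_ORDER.length : Int) 1 = [1, 2, 3] := by decide
  rw [pr]; clear pr
  rcases hsel with h | ⟨h, hn⟩ | ⟨h, hn⟩ | ⟨h, hn⟩ <;> subst h <;>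
    by_cases h0 : "SIMPLE" ∈ av <;> by_cases h1 : "MEDIUM" ∈ av <;>
    by_cases h2 : "COMPLEX" ∈ av <;> by_cases h3 : "REASONING" ∈ av <;>
    simp_all [pvRingLoopA, pvTIER_ORDER, pv_mk, PySem.List.min2?,
      PySem.List.pyGetD, PySem.List.pyGet?, PySem.List.pyIdx?,
      PySem.Dict.getD, PySem.Dict.get?]

-- ===== VERDICT (by name: the statement is the Claim_ definition above) =====
theorem nearest_available_tier_py_spec : Claim_equal_nearest_available_tier_py := by
  intro s av _
  unfold Spec_nearest_available_tier_py nearest_available_tier_py nearest_available_tier_py_alt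
  by_cases hs : av.contains s = true
  · rw [if_pos hs, if_pos hs]
  · rw [if_neg hs, if_neg hs]
    exact pv_core _ av (pv_sel s av hs)
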